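-- pv_equiv track=rewrite | github.com/lioka0099/FlashCardsProject | docqa-proto/ingest/chunker.py | _split_paras
-- ===== SOURCE A (Python) =====
-- from typing import Any, Dict, List, TypedDict
--
-- def _split_long_text(text: str, max_len: int) -> List[str]:
--     segments: List[str] = []
--     i, n = 0, len(text)
--     while i < n:
--         end = min(n, i + max_len)
--         if end < n:
--             cut = text.rfind(" ", i, end)
--             if cut == -1 or cut <= i + max_len // 3:
--                 cut = end
--         else:
--             cut = end
--         segment = text[i:cut].strip()
--         if segment:
--             segments.append(segment)
--         i = cut
--         while i < n and text[i].isspace():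
--             i += 1
--     return segments or [text[:max_len]]
--
-- def _split_paras(text: str, max_len: int) -> List[str]:
--     raw = [p.strip() for p in text.split("\n") if p.strip()]
--     paras: List[str] = []
--     buf: List[str] = []
--     for p in raw:
--         if len(p) < min(300, max_len):
--             buf.append(p)
--             continue
--         if buf:
--             joined = " ".join(buf).strip()
--             if joined:
--                 if len(joined) > max_len:
--                     paras.extend(_split_long_text(joined, max_len))
--                 else:
--                     paras.append(joined)
--             buf = []
--         if len(p) > max_len:
--             paras.extend(_split_long_text(p, max_len))
--         else:
--             paras.append(p)
--     if buf:
--         joined = " ".join(buf).strip()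
--         if joined:
--             if len(joined) > max_len:
--                 paras.extend(_split_long_text(joined, max_len))
--             else:
--                 paras.append(joined)
--     if not paras and raw:
--         for piece in _split_long_text(" ".join(raw), max_len):
--             paras.append(piece)
--     return paras
-- ===== SOURCE B (Python) =====
-- from typing import List, Tuple, Union
--
--
-- def _split_long_text(text: str, max_len: int) -> List[str]:
--     segments: List[str] = []
--     i, n = 0, len(text)
--     while i < n:
--         end = min(n, i + max_len)
--         if end < n:
--             cut = text.rfind(" ", i, end)
--             if cut == -1 or cut <= i + max_len // 3:
--                 cut = end
--         else:
--             cut = end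
--         segment = text[i:cut].strip()
--         if segment:
--             segments.append(segment)
--         i = cut
--         while i < n and text[i].isspace():
--             i += 1
--     return segments or [text[:max_len]]
--
--
-- def _split_paras(text: str, max_len: int) -> List[str]:
--     raw = [p.strip() for p in text.split("\n") if p.strip()]
--     threshold = min(300, max_len)
--     # Pass 1: group consecutive short paragraphs into runs; a long paragraph
--     # closes the current run and forms a group of its own.
--     groups: List[Tuple[str, Union[List[str], str]]] = []
--     run: List[str] = []
--     for p in raw:
--         if len(p) < threshold:
--             run.append(p)
--         else:
--             if run:
--                 groups.append(("run", run))
--                 run = []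
--             groups.append(("long", p))
--     if run:
--         groups.append(("run", run))
--     # Pass 2: emit each group, splitting any piece that exceeds max_len.
--     paras: List[str] = []
--     for kind, val in groups:
--         if kind == "run":
--             piece = " ".join(val).strip()
--             if not piece:
--                 continue
--         else:
--             piece = val
--         if len(piece) > max_len:
--             paras.extend(_split_long_text(piece, max_len))
--         else:
--             paras.append(piece)
--     if not paras and raw:
--         paras = list(_split_long_text(" ".join(raw), max_len))
--     return paras
-- ===== Notes on version B (the rewrite author's own statement) =====
-- stated objective: alternative
-- what changed: A's single pass with an interleaved short-paragraph buffer that is flushed inline is replaced by two passes: first group the paragraphs into an explicit list of tagged groups (runs of consecutive short paragraphs / single long paragraphs), then emit each group in order.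
-- outside the precondition, e.g. on _split_paras('a b', -5): A raises IndexError, B raises IndexError
import Mathlib
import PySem

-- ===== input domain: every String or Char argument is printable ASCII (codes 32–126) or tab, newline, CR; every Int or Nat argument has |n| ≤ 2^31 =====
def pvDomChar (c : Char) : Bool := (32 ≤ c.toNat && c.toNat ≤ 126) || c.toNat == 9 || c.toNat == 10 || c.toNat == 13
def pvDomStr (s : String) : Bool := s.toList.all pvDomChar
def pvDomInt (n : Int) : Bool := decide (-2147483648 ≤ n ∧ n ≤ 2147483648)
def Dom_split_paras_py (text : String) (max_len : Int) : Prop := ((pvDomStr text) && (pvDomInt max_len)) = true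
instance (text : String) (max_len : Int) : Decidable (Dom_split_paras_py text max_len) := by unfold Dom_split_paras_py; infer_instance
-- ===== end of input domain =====

-- B re-decomposes A's single-pass buffering into two passes (group paragraphs into short-runs /
-- long singletons, then emit each group); objective: alternative decomposition, same cost.


-- ===== PORT A =====
-- shared helpers: both Source A and Source B contain the IDENTICAL functions `_split_long_text` and the
-- computation of `raw`; they are ported once and used by both ports.

-- the inner `while i < n and text[i].isspace(): i += 1` loop of _split_long_text
def pvSkipWs (t : List Char) (i : Nat) : Nat :=
  if h : i < t.length then
    if PySem.Chars.isspace t[i] then pvSkipWs t (i + 1) else i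
  else i
termination_by t.length - i

-- the `while i < n:` loop of _split_long_text; fuel = number of remaining iterations (each
-- iteration advances i by at least 1 when 1 ≤ max_len, so fuel t.length + 1 never runs out
-- inside Pre_; Python diverges/raises where it would).
def pvSplitLongGo (t : List Char) (maxLen : Int) : Nat → Nat → List (List Char) → List (List Char)
  | 0, _, segs => segs
  | fuel + 1, i, segs =>
    if i < t.length then
      let n : Int := t.length
      let e : Int := min n ((i : Int) + maxLen)
      let cut : Int :=
        if e < n then
          let c := PySem.Chars.rfindFrom t [' '] (i : Int) (some e)   -- text.rfind(" ", i, end)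
          if c = -1 ∨ c ≤ (i : Int) + PySem.Int.floordiv maxLen 3 then e else c
        else e
      let segment := PySem.Chars.strip (PySem.Chars.slice t (some (i : Int)) (some cut))
      let segs' := if segment ≠ [] then segs ++ [segment] else segs
      pvSplitLongGo t maxLen fuel (pvSkipWs t cut.toNat) segs'
    else segs

-- _split_long_text (on List Char)
def pvSplitLong (t : List Char) (maxLen : Int) : List (List Char) :=
  let segs := pvSplitLongGo t maxLen (t.length + 1) 0 []
  if segs = [] then [PySem.Chars.slice t none (some maxLen)] else segs   -- segments or [text[:max_len]]

-- raw = [p.strip() for p in text.split("\n") if p.strip()]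
def pvRaw (text : String) : List (List Char) :=
  ((PySem.Chars.splitOn text.toList ['\n']).map PySem.Chars.strip).filter (fun p => decide (p ≠ []))

-- A's flush block (`joined = " ".join(buf).strip(); if joined: …`), written twice in the Python;
-- factored as one helper used at both sites.
def pvFlushA (maxLen : Int) (paras buf : List (List Char)) : List (List Char) :=
  let joined := PySem.Chars.strip (PySem.Chars.join [' '] buf)
  if joined ≠ [] then
    if (joined.length : Int) > maxLen then paras ++ pvSplitLong joined maxLen
    else paras ++ [joined]
  else paras

-- A's `for p in raw:` loop over state (paras, buf)
def pvLoopA (maxLen : Int) : List (List Char) → List (List Char) × List (List Char) → List (List Char) × List (List Char)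
  | [], st => st
  | p :: rest, (paras, buf) =>
    if (p.length : Int) < min (300 : Int) maxLen then
      pvLoopA maxLen rest (paras, buf ++ [p])
    else
      let paras1 := if buf ≠ [] then pvFlushA maxLen paras buf else paras
      let paras2 := if (p.length : Int) > maxLen then paras1 ++ pvSplitLong p maxLen else paras1 ++ [p]
      pvLoopA maxLen rest (paras2, [])

def split_paras_py (text : String) (max_len : Int) : List String :=
  let raw := pvRaw text
  let st := pvLoopA max_len raw ([], [])
  let paras := if st.2 ≠ [] then pvFlushA max_len st.1 st.2 else st.1   -- final `if buf:` flush
  let paras' := if paras = [] ∧ raw ≠ [] then paras ++ pvSplitLong (PySem.Chars.join [' '] raw) max_len else paras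
  paras'.map String.ofList

-- ===== PORT B =====
-- a group is a run of consecutive short paragraphs, or a single long paragraph
inductive PvGroup
  | run : List (List Char) → PvGroup
  | long : List Char → PvGroup
deriving DecidableEq, Repr

-- pass 1 loop body: append to the current run, or close it and add a long group
def pvGroupStep (maxLen : Int) (st : List PvGroup × List (List Char)) (p : List Char) : List PvGroup × List (List Char) :=
  if (p.length : Int) < min (300 : Int) maxLen then (st.1, st.2 ++ [p])
  else ((if st.2 ≠ [] then st.1 ++ [PvGroup.run st.2] else st.1) ++ [PvGroup.long p], [])

def pvGroupsB (maxLen : Int) (raw : List (List Char)) : List PvGroup :=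
  let st := raw.foldl (pvGroupStep maxLen) ([], [])
  if st.2 ≠ [] then st.1 ++ [PvGroup.run st.2] else st.1   -- trailing `if run:`

-- pass 2 loop body: emit one group
def pvEmitB (maxLen : Int) (paras : List (List Char)) : PvGroup → List (List Char)
  | PvGroup.run r =>
    let piece := PySem.Chars.strip (PySem.Chars.join [' '] r)
    if piece ≠ [] then
      if (piece.length : Int) > maxLen then paras ++ pvSplitLong piece maxLen
      else paras ++ [piece]
    else paras
  | PvGroup.long p =>
    if (p.length : Int) > maxLen then paras ++ pvSplitLong p maxLen
    else paras ++ [p]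

def split_paras_py_alt (text : String) (max_len : Int) : List String :=
  let raw := pvRaw text
  let gs := pvGroupsB max_len raw
  let paras := gs.foldl (pvEmitB max_len) []
  let paras' := if paras = [] ∧ raw ≠ [] then pvSplitLong (PySem.Chars.join [' '] raw) max_len else paras
  paras'.map String.ofList

-- ===== PRECONDITION & SPEC =====
-- Pre_ excludes max_len ≤ 0 together with a non-whitespace character in text: there A never
-- returns (the `while i < n` loop of _split_long_text stops advancing, so Python A diverges or
-- hits an IndexError); B, which uses the same helper, does not return there either.
def Pre_split_paras_py (text : String) (max_len : Int) : Prop :=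
  1 ≤ max_len ∨ text.toList.all (fun c => PySem.Chars.isspace c) = true

instance (text : String) (max_len : Int) : Decidable (Pre_split_paras_py text max_len) := by
  unfold Pre_split_paras_py; infer_instance

def pvWitness_split_paras_py : String × Int := ("one two\nthree", 5)

def Spec_split_paras_py (text : String) (max_len : Int) (out : List String) : Prop := out = split_paras_py_alt text max_len
instance (text : String) (max_len : Int) (out : List String) : Decidable (Spec_split_paras_py text max_len out) := by unfold Spec_split_paras_py; infer_instance

-- ===== CLAIM (what is proved, stated in full; the proofs are below) =====
def Claim_equal_split_paras_py : Prop := ∀ (text : String) (max_len : Int), Dom_split_paras_py text max_len → Pre_split_paras_py text max_len → Spec_split_paras_py text max_len (split_paras_py text max_len)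

-- ===== LEMMAS AND PROOFS =====

-- proof-only: the grouping pass written as a pure recursion (output built front-to-back)
def pvGroupsPure (maxLen : Int) : List (List Char) → List (List Char) → List PvGroup
  | [], run => if run ≠ [] then [PvGroup.run run] else []
  | p :: rest, run =>
    if (p.length : Int) < min (300 : Int) maxLen then pvGroupsPure maxLen rest (run ++ [p])
    else (if run ≠ [] then [PvGroup.run run] else []) ++ PvGroup.long p :: pvGroupsPure maxLen rest []

theorem pvGroupsB_eq_pure_aux (maxLen : Int) (rest : List (List Char)) :
    ∀ (gs : List PvGroup) (run : List (List Char)),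
      (let st := rest.foldl (pvGroupStep maxLen) (gs, run);
       if st.2 ≠ [] then st.1 ++ [PvGroup.run st.2] else st.1)
      = gs ++ pvGroupsPure maxLen rest run := by
  induction rest with
  | nil => intro gs run; by_cases h : run = [] <;> simp [pvGroupsPure, h]
  | cons p rest ih =>
    intro gs run
    by_cases hs : (p.length : Int) < min (300 : Int) maxLen
    · simpa [pvGroupStep, pvGroupsPure, hs] using ih gs (run ++ [p])
    · by_cases hr : run = [] <;>
        simp [pvGroupStep, pvGroupsPure, hs, hr, ih, List.append_assoc]

theorem pvGroupsB_eq_pure (maxLen : Int) (raw : List (List Char)) :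
    pvGroupsB maxLen raw = pvGroupsPure maxLen raw [] := by
  simpa [pvGroupsB] using pvGroupsB_eq_pure_aux maxLen raw [] []

theorem pvFlushA_eq_emit_run (maxLen : Int) (paras buf : List (List Char)) :
    pvFlushA maxLen paras buf = pvEmitB maxLen paras (PvGroup.run buf) := rfl

-- the heart: A's buffering loop (plus its final flush) emits exactly B's groups in order
theorem pvLoopA_eq_emit (maxLen : Int) (rest : List (List Char)) :
    ∀ (buf paras : List (List Char)),
      (if (pvLoopA maxLen rest (paras, buf)).2 ≠ [] then
        pvFlushA maxLen (pvLoopA maxLen rest (paras, buf)).1 (pvLoopA maxLen rest (paras, buf)).2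
       else (pvLoopA maxLen rest (paras, buf)).1)
      = (pvGroupsPure maxLen rest buf).foldl (pvEmitB maxLen) paras := by
  induction rest with
  | nil =>
    intro buf paras
    by_cases h : buf = [] <;> simp [pvLoopA, pvGroupsPure, h, pvFlushA_eq_emit_run]
  | cons p rest ih =>
    intro buf paras
    by_cases hs : (p.length : Int) < min (300 : Int) maxLen
    · simp only [pvLoopA, pvGroupsPure, if_pos hs]
      exact ih (buf ++ [p]) paras
    · simp only [pvLoopA, pvGroupsPure, if_neg hs]
      rw [ih]
      by_cases hr : buf = []
      · simp [hr, pvEmitB]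
      · simp [hr, pvEmitB, pvFlushA]

-- ===== VERDICT (by name: the statement is the Claim_ definition above) =====
theorem split_paras_py_spec : Claim_equal_split_paras_py := by
  intro text max_len _ _
  unfold Spec_split_paras_py split_paras_py split_paras_py_alt
  simp only [pvGroupsB_eq_pure, pvLoopA_eq_emit]
  by_cases h : (pvGroupsPure max_len (pvRaw text) []).foldl (pvEmitB max_len) [] = [] ∧ pvRaw text ≠ [] <;>
    simp [h]
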